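-- pv_equiv track=rewrite | github.com/molangning/irr-tracker | scripts/lib.py | extract_serial
-- ===== SOURCE A (Python) =====
-- def extract_serial(urls, name):
--     current_serial_file = ""
--     root_path = ""
--
--     for i in urls:
--
--         path = i.split("://", 1)[-1].split("/", 1)[1].rstrip("/")
--
--         if "CURRENTSERIAL" in path:
--             current_serial_file = path
--
--         elif path.endswith(".gz"):
--             continue
--
--         else:
--             root_path = path
--
--     if not current_serial_file:
--         current_serial_file = f"{root_path}/{name.upper()}.CURRENTSERIAL"
--
--     return current_serial_file.lstrip("/")
-- ===== SOURCE B (Python) =====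
-- def extract_serial(urls, name):
--     paths = [u.split("://", 1)[-1].split("/", 1)[1].rstrip("/") for u in urls]
--     current = next((p for p in reversed(paths) if "CURRENTSERIAL" in p), "")
--     if not current:
--         root = next((p for p in reversed(paths)
--                      if "CURRENTSERIAL" not in p and not p.endswith(".gz")), "")
--         current = f"{root}/{name.upper()}.CURRENTSERIAL"
--     return current.lstrip("/")
-- ===== Notes on version B (the rewrite author's own statement) =====
-- stated objective: simpler
-- what changed: Replaces A's single stateful if/elif/else accumulator loop with a cleaned-path list followed by two independent reversed filtered searches (last CURRENTSERIAL path; last non-serial, non-.gz path as root).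
import Mathlib
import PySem

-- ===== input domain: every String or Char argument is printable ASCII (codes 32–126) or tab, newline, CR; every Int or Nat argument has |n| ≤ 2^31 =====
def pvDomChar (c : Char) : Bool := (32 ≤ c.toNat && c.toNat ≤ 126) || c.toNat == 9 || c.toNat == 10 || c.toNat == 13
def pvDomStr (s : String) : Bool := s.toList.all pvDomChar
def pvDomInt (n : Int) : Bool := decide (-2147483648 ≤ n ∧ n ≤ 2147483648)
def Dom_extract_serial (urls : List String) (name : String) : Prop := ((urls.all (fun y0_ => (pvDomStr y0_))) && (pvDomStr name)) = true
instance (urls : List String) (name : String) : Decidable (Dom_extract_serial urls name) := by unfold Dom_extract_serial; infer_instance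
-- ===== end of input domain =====

-- B replaces A's single stateful if/elif/else pass by a path list plus two reversed
-- filtered searches (last match wins); objective: simpler decomposition, same cost.
-- ===== PORT A =====
-- s.lstrip("/") / s.rstrip("/"): hand-ported (PySem has only two-sided stripChars);
-- exact for a single-character strip set.
def lstripSlash (s : String) : String := String.ofList (s.toList.dropWhile (fun c => c == '/'))
def rstripSlash (s : String) : String := String.ofList ((s.toList.reverse.dropWhile (fun c => c == '/')).reverse)

-- i.split("://", 1)[-1].split("/", 1)[1].rstrip("/"); none = IndexError (no "/" after the scheme)
def pyPath? (i : String) : Option String :=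
  match PySem.List.pyGet? ((PySem.Str.splitMax? i "://" 1).getD []) (-1) with
  | none => none
  | some t =>
    match PySem.List.pyGet? ((PySem.Str.splitMax? t "/" 1).getD []) 1 with
    | none => none
    | some p => some (rstripSlash p)

-- A's loop: state (current_serial_file, root_path); none propagates the IndexError
def aLoop (urls : List String) (cur root : String) : Option (String × String) :=
  match urls with
  | [] => some (cur, root)
  | i :: rest =>
    match pyPath? i with
    | none => none
    | some path =>
      if PySem.Str.isIn "CURRENTSERIAL" path then aLoop rest path root
      else if PySem.Str.endswith path ".gz" then aLoop rest cur root
      else aLoop rest cur path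

def extract_serial (urls : List String) (name : String) : String :=
  match aLoop urls "" "" with
  | none => ""  -- unreachable under Pre_extract_serial (Python raises IndexError here)
  | some (cur, root) =>
    lstripSlash (if cur = "" then root ++ "/" ++ PySem.Str.upper name ++ ".CURRENTSERIAL" else cur)

-- ===== PORT B =====
def extract_serial_alt (urls : List String) (name : String) : String :=
  match urls.mapM pyPath? with   -- the comprehension; none = IndexError, excluded by Pre_
  | none => ""
  | some paths =>
    let current := (paths.reverse.find? (fun p => PySem.Str.isIn "CURRENTSERIAL" p)).getD ""
    lstripSlash (if current = "" then
        ((paths.reverse.find? (fun p =>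
            !(PySem.Str.isIn "CURRENTSERIAL" p) && !(PySem.Str.endswith p ".gz"))).getD "")
          ++ "/" ++ PySem.Str.upper name ++ ".CURRENTSERIAL"
      else current)

-- ===== PRECONDITION & SPEC =====
-- Pre_ excludes exactly the urls with no "/" after the scheme part, on which A's
-- `.split("/", 1)[1]` raises IndexError.
def Pre_extract_serial (urls : List String) (name : String) : Prop :=
  ∀ u ∈ urls,
    (if PySem.Str.find u "://" = -1 then PySem.Str.isIn "/" u
     else PySem.Str.isIn "/" (PySem.Str.slice u (some (PySem.Str.find u "://" + 3)) none)) = true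
instance (urls : List String) (name : String) : Decidable (Pre_extract_serial urls name) := by
  unfold Pre_extract_serial; infer_instance
def pvWitness_extract_serial : List String × String :=
  (["https://example.net/db/x.CURRENTSERIAL", "https://example.net/db/"], "apnic")
def Spec_extract_serial (urls : List String) (name : String) (out : String) : Prop := out = extract_serial_alt urls name
instance (urls : List String) (name : String) (out : String) : Decidable (Spec_extract_serial urls name out) := by unfold Spec_extract_serial; infer_instance

-- ===== CLAIM (what is proved, stated in full; the proofs are below) =====
def Claim_equal_extract_serial : Prop := ∀ (urls : List String) (name : String), Dom_extract_serial urls name → Pre_extract_serial urls name → Spec_extract_serial urls name (extract_serial urls name)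

-- ===== LEMMAS AND PROOFS =====
-- A's loop over path VALUES, as a fold (proof-only helper)
def pairFold (ps : List String) (cur root : String) : String × String :=
  ps.foldl (fun s p =>
    if PySem.Str.isIn "CURRENTSERIAL" p then (p, s.2)
    else if PySem.Str.endswith p ".gz" then s
    else (s.1, p)) (cur, root)

theorem mapM_cons_some (i : String) (rest : List String) (path : String)
    (hp : pyPath? i = some path) :
    List.mapM pyPath? (i :: rest) = (List.mapM pyPath? rest).map (fun ps => path :: ps) := by
  cases h : List.mapM pyPath? rest <;> simp [List.mapM_cons, hp, h]

theorem aLoop_eq_mapM (urls : List String) (cur root : String) :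
    aLoop urls cur root = (urls.mapM pyPath?).map (fun ps => pairFold ps cur root) := by
  induction urls generalizing cur root with
  | nil => rfl
  | cons i rest ih =>
    cases hp : pyPath? i with
    | none => simp [aLoop, List.mapM_cons, hp]
    | some path =>
      rw [mapM_cons_some i rest path hp, Option.map_map]
      simp only [aLoop, hp]
      split_ifs <;> rw [ih] <;> congr 1 <;> funext ps <;>
        simp_all [pairFold, List.foldl_cons, Function.comp]

theorem pairFold_spec (ps : List String) (cur root : String) :
    pairFold ps cur root =
      ((ps.reverse.find? (fun p => PySem.Str.isIn "CURRENTSERIAL" p)).getD cur,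
       (ps.reverse.find? (fun p =>
          !(PySem.Str.isIn "CURRENTSERIAL" p) && !(PySem.Str.endswith p ".gz"))).getD root) := by
  induction ps generalizing cur root with
  | nil => rfl
  | cons p ps ih =>
    have hstep : pairFold (p :: ps) cur root =
        pairFold ps (if PySem.Str.isIn "CURRENTSERIAL" p then p else cur)
          (if PySem.Str.isIn "CURRENTSERIAL" p then root
           else if PySem.Str.endswith p ".gz" then root else p) := by
      simp only [pairFold, List.foldl_cons]; split_ifs <;> rfl
    rw [hstep, ih, List.reverse_cons]
    simp only [List.find?_append]
    by_cases h1 : PySem.Str.isIn "CURRENTSERIAL" p <;>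
      by_cases h2 : PySem.Str.endswith p ".gz" <;>
      cases hf : ps.reverse.find? (fun p => PySem.Str.isIn "CURRENTSERIAL" p) <;>
      cases hg : ps.reverse.find? (fun p =>
          !(PySem.Str.isIn "CURRENTSERIAL" p) && !(PySem.Str.endswith p ".gz")) <;>
      simp_all [List.find?]

-- ===== VERDICT (by name: the statement is the Claim_ definition above) =====
theorem extract_serial_spec : Claim_equal_extract_serial := by
  intro urls name _ _
  unfold Spec_extract_serial extract_serial extract_serial_alt
  rw [aLoop_eq_mapM]
  cases h : urls.mapM pyPath? with
  | none => rfl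
  | some paths => simp [pairFold_spec]
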